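-- pv_equiv track=rewrite | github.com/Jamesprocode/FullPageJazzOMR | per_sample_analysis.py | kern_spine_only
-- ===== SOURCE A (Python) =====
-- def kern_spine_only(text: str) -> str:
--     """Return only the **kern column from a humdrum string."""
--     out, kern_col = [], None
--     for line in text.split("\n"):
--         if not line.strip():
--             continue
--         parts = line.split("\t")
--         if kern_col is None:
--             for i, p in enumerate(parts):
--                 if p.strip().startswith("**kern"):
--                     kern_col = i
--                     break
--         if kern_col is not None and kern_col < len(parts):
--             out.append(parts[kern_col])
--         else:
--             out.append(parts[0])
--     return "\n".join(out)
-- ===== SOURCE B (Python) =====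
-- def kern_spine_only(text: str) -> str:
--     rows = [l.split("\t") for l in text.split("\n") if l.strip()]
--     hdr = next((i for i, r in enumerate(rows)
--                 if any(p.strip().startswith("**kern") for p in r)), None)
--     if hdr is None:
--         return "\n".join(r[0] for r in rows)
--     kc = next(j for j, p in enumerate(rows[hdr]) if p.strip().startswith("**kern"))
--     pre = [r[0] for r in rows[:hdr]]
--     post = [r[kc] if kc < len(r) else r[0] for r in rows[hdr:]]
--     return "\n".join(pre + post)
-- ===== Notes on version B (the rewrite author's own statement) =====
-- stated objective: alternative
-- what changed: Instead of A's single fold that threads an Option kern-column state through every line, B builds the non-blank row list, locates the header row index with a search (next/enumerate/any), then slices the rows and emits the pre-header segment (first column) and the from-header segment (kern column) as two separate comprehensions.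
import Mathlib
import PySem

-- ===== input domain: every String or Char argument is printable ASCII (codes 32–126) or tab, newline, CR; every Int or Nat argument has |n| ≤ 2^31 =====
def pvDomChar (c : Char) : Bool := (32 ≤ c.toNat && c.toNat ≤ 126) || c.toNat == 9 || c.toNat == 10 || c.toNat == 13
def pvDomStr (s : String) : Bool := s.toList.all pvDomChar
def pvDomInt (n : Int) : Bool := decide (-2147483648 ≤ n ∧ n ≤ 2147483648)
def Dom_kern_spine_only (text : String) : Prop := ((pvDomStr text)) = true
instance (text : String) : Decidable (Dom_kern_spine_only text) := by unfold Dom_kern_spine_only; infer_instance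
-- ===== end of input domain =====

-- B replaces A's single fold threading an Option kern-column state with staged passes:
-- find the header row index, slice the row list, and emit the two segments separately.

-- ===== PORT A =====
-- s.split(sep) with sep ≠ "": PySem.Str.split? is none only for sep = "", so getD [] is exact here
def pvSplit (s sep : String) : List String := (PySem.Str.split? s sep).getD []

-- inner 'for i, p in enumerate(parts): if p.strip().startswith("**kern"): kern_col = i; break'
def pvFindKern (parts : List String) (i : Int) : Option Int :=
  match parts with
  | [] => none
  | p :: rest =>
    if PySem.Str.startswith (PySem.Str.strip p) "**kern" then some i
    else pvFindKern rest (i + 1)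

def pvStepA (st : List String × Option Int) (line : String) : List String × Option Int :=
  if PySem.Str.strip line == "" then st
  else
    let parts := pvSplit line "\t"
    let kc : Option Int :=
      match st.2 with
      | some k => some k
      | none => pvFindKern parts 0
    match kc with
    | some k =>
      -- parts[kern_col]: guard 'kern_col < len(parts)' holds with 0 ≤ k, so pyGet? is some; getD "" exact
      if k < (parts.length : Int) then (st.1 ++ [(PySem.List.pyGet? parts k).getD ""], some k)
      else (st.1 ++ [parts.headD ""], some k)   -- parts[0]: split("\t") is never empty, so headD "" exact
    | none => (st.1 ++ [parts.headD ""], none)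

def kern_spine_only (text : String) : String :=
  PySem.Str.join "\n" (((pvSplit text "\n").foldl pvStepA ([], none)).1)

-- ===== PORT B =====
-- p.strip().startswith("**kern")
def pvTok (p : String) : Bool := PySem.Str.startswith (PySem.Str.strip p) "**kern"

def kern_spine_only_alt (text : String) : String :=
  -- rows = [l.split("\t") for l in text.split("\n") if l.strip()]
  let rows := ((pvSplit text "\n").filter (fun l => !(PySem.Str.strip l == ""))).map
      (fun l => pvSplit l "\t")
  -- hdr = next((i for i, r in enumerate(rows) if any(...)), None)  →  findIdx?
  match rows.findIdx? (fun r => r.any pvTok) with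
  | none => PySem.Str.join "\n" (rows.map (fun r => r.headD ""))   -- r[0]: split("\t") never empty
  | some h =>
    -- kc = next(j for j, p in enumerate(rows[hdr]) if ...): the match exists by choice of hdr, so findIdx is exact
    let kc := (rows.getD h []).findIdx pvTok
    -- rows[:hdr] / rows[hdr:] with 0 ≤ h ≤ len rows: take/drop are exact slices
    let pre := (rows.take h).map (fun r => r.headD "")
    let post := (rows.drop h).map
        (fun r => if kc < r.length then r.getD kc "" else r.headD "")  -- r[kc] under kc < len(r): getD exact
    PySem.Str.join "\n" (pre ++ post)

-- ===== PRECONDITION & SPEC =====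
def Spec_kern_spine_only (text : String) (out : String) : Prop := out = kern_spine_only_alt text
instance (text : String) (out : String) : Decidable (Spec_kern_spine_only text out) := by unfold Spec_kern_spine_only; infer_instance

-- ===== CLAIM (what is proved, stated in full; the proofs are below) =====
def Claim_equal_kern_spine_only : Prop := ∀ (text : String), Dom_kern_spine_only text → Spec_kern_spine_only text (kern_spine_only text)

-- ===== LEMMAS AND PROOFS =====

-- proof-side intermediate: A's fold, written as structural recursion over the non-blank rows
def pvRowsOf (lines : List String) : List (List String) :=
  (lines.filter (fun l => !(PySem.Str.strip l == ""))).map (fun l => pvSplit l "\t")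

def pvEmitRest (k : Int) (rows : List (List String)) : List String :=
  rows.map (fun r => if k < (r.length : Int) then (PySem.List.pyGet? r k).getD "" else r.headD "")

def pvGoB : List (List String) → List String
  | [] => []
  | parts :: rest =>
    match pvFindKern parts 0 with
    | some k => (PySem.List.pyGet? parts k).getD "" :: pvEmitRest k rest
    | none => parts.headD "" :: pvGoB rest

theorem pvFindKern_eq (parts : List String) (i : Int) :
    pvFindKern parts i = (parts.findIdx? pvTok).map (fun n => i + n) := by
  induction parts generalizing i with
  | nil => rfl
  | cons p rest ih =>
    simp only [pvFindKern, List.findIdx?_cons, pvTok]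
    split
    · simp
    · rw [ih]
      cases rest.findIdx? pvTok <;> simp <;> ring

theorem pvRowsOf_cons (l : String) (ls : List String) :
    pvRowsOf (l :: ls) =
      if PySem.Str.strip l == "" then pvRowsOf ls
      else pvSplit l "\t" :: pvRowsOf ls := by
  by_cases h : PySem.Str.strip l == "" <;> simp [pvRowsOf, h]

theorem foldl_some (lines : List String) (acc : List String) (k : Int) :
    lines.foldl pvStepA (acc, some k) = (acc ++ pvEmitRest k (pvRowsOf lines), some k) := by
  induction lines generalizing acc with
  | nil => simp [pvRowsOf, pvEmitRest]
  | cons l rest ih =>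
    rw [List.foldl_cons, pvRowsOf_cons]
    by_cases h : PySem.Str.strip l == ""
    · simp [pvStepA, h, ih]
    · simp only [pvStepA, h, Bool.false_eq_true, if_false, pvEmitRest, List.map_cons]
      by_cases hk : k < ((pvSplit l "\t").length : Int) <;>
        simp [hk, ih, pvEmitRest]

theorem pvFindKern_range (parts : List String) (i k : Int)
    (h : pvFindKern parts i = some k) : i ≤ k ∧ k < i + parts.length := by
  induction parts generalizing i with
  | nil => simp [pvFindKern] at h
  | cons p rest ih =>
    simp only [pvFindKern] at h
    split at h
    · cases h; simp only [List.length_cons]; push_cast; omega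
    · have := ih (i + 1) h
      simp only [List.length_cons]
      push_cast
      push_cast at this
      omega

theorem foldl_none (lines : List String) (acc : List String) :
    (lines.foldl pvStepA (acc, none)).1 = acc ++ pvGoB (pvRowsOf lines) := by
  induction lines generalizing acc with
  | nil => simp [pvRowsOf, pvGoB]
  | cons l rest ih =>
    rw [List.foldl_cons, pvRowsOf_cons]
    by_cases h : PySem.Str.strip l == ""
    · simp [pvStepA, h, ih]
    · cases hf : pvFindKern (pvSplit l "\t") 0 with
      | none => simp [pvStepA, h, hf, ih, pvGoB]
      | some k =>
        have hr := pvFindKern_range _ _ _ hf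
        have hk : k < ((pvSplit l "\t").length : Int) := by omega
        simp [pvStepA, h, hf, hk, foldl_some, pvGoB]

-- pvEmitRest with a Nat index equals B's map
theorem pvEmitRest_natCast (n : Nat) (rows : List (List String)) :
    pvEmitRest (n : Int) rows =
      rows.map (fun r => if n < r.length then r.getD n "" else r.headD "") := by
  unfold pvEmitRest
  apply List.map_congr_left
  intro r _
  by_cases h : n < r.length
  · simp [h, List.getD]
  · simp [h]

theorem pvGoB_eq (rows : List (List String)) :
    pvGoB rows =
      match rows.findIdx? (fun r => r.any pvTok) with
      | none => rows.map (fun r => r.headD "")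
      | some h =>
        (rows.take h).map (fun r => r.headD "") ++
        (rows.drop h).map
          (fun r => if (rows.getD h []).findIdx pvTok < r.length
                    then r.getD ((rows.getD h []).findIdx pvTok) "" else r.headD "") := by
  induction rows with
  | nil => rfl
  | cons parts rest ih =>
    by_cases ha : parts.any pvTok
    · -- header is the first row
      have hlt : parts.findIdx pvTok < parts.length :=
        List.findIdx_lt_length_of_exists (by simpa using ha)
      have hfi : parts.findIdx? pvTok = some (parts.findIdx pvTok) :=
        List.findIdx?_eq_some_iff_findIdx_eq.mpr ⟨hlt, rfl⟩
      have hA : pvFindKern parts 0 = some (parts.findIdx pvTok) := by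
        rw [pvFindKern_eq, hfi]; simp
      simp only [pvGoB, hA, List.findIdx?_cons, ha, if_true]
      simp [pvEmitRest_natCast, hlt, List.getD]
    · have ha' : ∀ x ∈ parts, pvTok x = false := by
        intro x hx
        by_contra hc
        exact ha (List.any_eq_true.mpr ⟨x, hx, by simpa using hc⟩)
      have hA : pvFindKern parts 0 = none := by
        have hn : parts.findIdx? pvTok = none := List.findIdx?_eq_none_iff.mpr ha'
        rw [pvFindKern_eq, hn]; rfl
      have hb : parts.any pvTok = false := List.any_eq_false.mpr (by simpa using ha')
      simp only [pvGoB, hA, List.findIdx?_cons, hb, Bool.false_eq_true, if_false]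
      cases hr : rest.findIdx? (fun r => r.any pvTok) with
      | none => simp [ih, hr]
      | some h => simp [ih, hr]

-- ===== VERDICT (by name: the statement is the Claim_ definition above) =====
theorem kern_spine_only_spec : Claim_equal_kern_spine_only := by
  intro text _
  unfold Spec_kern_spine_only kern_spine_only kern_spine_only_alt
  rw [foldl_none]
  simp only [List.nil_append]
  rw [pvGoB_eq]
  unfold pvRowsOf
  split <;> rfl
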